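-- pv_equiv track=rewrite | github.com/imoutidi/Climate_Change_Twitter | Text_Based/LSH.py | divide_list_into_chunks
-- ===== SOURCE A (Python) =====
-- def divide_list_into_chunks(lst, num_chunks):
--     if num_chunks <= 0:
--         raise ValueError("Number of chunks must be greater than 0")
--
--     chunk_size = len(lst) // num_chunks
--     remainder = len(lst) % num_chunks
--
--     indexes = []
--     start = 0
--
--     for _ in range(num_chunks):
--         if remainder > 0:
--             end = start + chunk_size + 1
--             remainder -= 1
--         else:
--             end = start + chunk_size
--
--         indexes.append((start, end - 1))
--         start = end
--
--     return indexes
-- ===== SOURCE B (Python) =====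
-- def divide_list_into_chunks(lst, num_chunks):
--     if num_chunks <= 0:
--         raise ValueError("Number of chunks must be greater than 0")
--     chunk_size, remainder = divmod(len(lst), num_chunks)
--     indexes = []
--     for i in range(num_chunks):
--         start = i * chunk_size + min(i, remainder)
--         end = start + chunk_size + (1 if i < remainder else 0)
--         indexes.append((start, end - 1))
--     return indexes
-- ===== Notes on version B (the rewrite author's own statement) =====
-- stated objective: alternative
-- what changed: Each chunk boundary is computed in closed form from the chunk index (start = i*chunk_size + min(i, remainder)) instead of threading a running start and a decremented remainder through the loop.
import Mathlib
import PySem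

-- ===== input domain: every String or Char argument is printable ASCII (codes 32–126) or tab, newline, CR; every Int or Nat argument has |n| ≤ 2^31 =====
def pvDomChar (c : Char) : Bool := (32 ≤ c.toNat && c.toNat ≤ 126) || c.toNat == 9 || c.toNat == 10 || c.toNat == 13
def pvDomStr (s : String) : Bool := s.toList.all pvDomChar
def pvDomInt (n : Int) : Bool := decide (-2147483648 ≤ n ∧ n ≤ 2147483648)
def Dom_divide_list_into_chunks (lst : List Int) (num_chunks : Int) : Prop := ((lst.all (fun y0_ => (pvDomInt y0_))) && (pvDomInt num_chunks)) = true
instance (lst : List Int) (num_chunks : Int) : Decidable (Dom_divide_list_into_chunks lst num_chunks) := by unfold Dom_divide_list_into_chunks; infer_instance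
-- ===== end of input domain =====

-- B computes each chunk boundary in closed form from the chunk index (start = i*chunk_size + min i remainder)
-- instead of A's running accumulator and remainder decrement; same cost, different decomposition.


-- ===== PORT A =====
-- literal port of A: fold over range(num_chunks) carrying (indexes, start, remainder)
def divide_list_into_chunks (lst : List Int) (num_chunks : Int) : List (Int × Int) :=
  let chunk_size := PySem.Int.floordiv (lst.length : Int) num_chunks
  let remainder := PySem.Int.mod (lst.length : Int) num_chunks
  let st := (PySem.List.pyRange 0 num_chunks 1).foldl
    (fun (s : List (Int × Int) × Int × Int) _ =>
      if s.2.2 > 0 then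
        let e := s.2.1 + chunk_size + 1
        (s.1 ++ [(s.2.1, e - 1)], e, s.2.2 - 1)
      else
        let e := s.2.1 + chunk_size
        (s.1 ++ [(s.2.1, e - 1)], e, s.2.2))
    ([], 0, remainder)
  st.1

-- ===== PORT B =====
-- literal port of B: map the closed form over range(num_chunks)
def divide_list_into_chunks_alt (lst : List Int) (num_chunks : Int) : List (Int × Int) :=
  let chunk_size := PySem.Int.floordiv (lst.length : Int) num_chunks
  let remainder := PySem.Int.mod (lst.length : Int) num_chunks
  (PySem.List.pyRange 0 num_chunks 1).map (fun i =>
    let start := i * chunk_size + min i remainder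
    let e := start + chunk_size + (if i < remainder then 1 else 0)
    (start, e - 1))

-- ===== PRECONDITION & SPEC =====
-- A raises ValueError when num_chunks <= 0; exactly those inputs are excluded.
def Pre_divide_list_into_chunks (lst : List Int) (num_chunks : Int) : Prop := 0 < num_chunks
instance (lst : List Int) (num_chunks : Int) : Decidable (Pre_divide_list_into_chunks lst num_chunks) := by unfold Pre_divide_list_into_chunks; infer_instance
def pvWitness_divide_list_into_chunks : List Int × Int := ([1, 2, 3, 4, 5], 3)

def Spec_divide_list_into_chunks (lst : List Int) (num_chunks : Int) (out : List (Int × Int)) : Prop := out = divide_list_into_chunks_alt lst num_chunks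
instance (lst : List Int) (num_chunks : Int) (out : List (Int × Int)) : Decidable (Spec_divide_list_into_chunks lst num_chunks out) := by unfold Spec_divide_list_into_chunks; infer_instance

-- ===== CLAIM (what is proved, stated in full; the proofs are below) =====
def Claim_equal_divide_list_into_chunks : Prop := ∀ (lst : List Int) (num_chunks : Int), Dom_divide_list_into_chunks lst num_chunks → Pre_divide_list_into_chunks lst num_chunks → Spec_divide_list_into_chunks lst num_chunks (divide_list_into_chunks lst num_chunks)

-- ===== LEMMAS AND PROOFS =====

-- the closed-form row B produces, relative to a loop start s and remaining remainder r
def pvRow (cs s r i : Int) : Int × Int :=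
  (s + i * cs + min i r, s + i * cs + min i r + cs + (if i < r then 1 else 0) - 1)

-- A's loop state invariant: the fold over ANY list (elements ignored) of length n,
-- started at (acc, s, r) with 0 ≤ r, appends the closed-form rows.
theorem pvLoop_eq (cs : Int) (l : List Int) :
    ∀ (acc : List (Int × Int)) (s r : Int), 0 ≤ r →
    ((l.foldl
      (fun (st : List (Int × Int) × Int × Int) _ =>
        if st.2.2 > 0 then
          let e := st.2.1 + cs + 1
          (st.1 ++ [(st.2.1, e - 1)], e, st.2.2 - 1)
        else
          let e := st.2.1 + cs
          (st.1 ++ [(st.2.1, e - 1)], e, st.2.2))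
      (acc, s, r)).1)
    = acc ++ (List.range l.length).map (fun j : Nat => pvRow cs s r (j : Int)) := by
  induction l with
  | nil => intro acc s r _; simp
  | cons x t ih =>
    intro acc s r hr
    by_cases h : r > 0
    · simp only [List.foldl_cons, if_pos h]
      rw [ih (acc ++ [(s, s + cs + 1 - 1)]) (s + cs + 1) (r - 1) (by omega)]
      simp only [List.length_cons, List.range_succ_eq_map, List.map_cons, List.map_map]
      simp only [List.append_assoc, List.singleton_append]
      have hmin0 : min (0 : Int) r = 0 := by omega
      simp only [pvRow]
      simp [hmin0, h]
      intro j _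
      have hj : (0 : Int) ≤ (j : Int) := Int.natCast_nonneg j
      have hm : ((j : Int) + 1) * cs = (j : Int) * cs + cs := by ring
      rw [hm]
      generalize (j : Int) * cs = p
      constructor
      · omega
      · split_ifs <;> omega
    · have hr0 : r = 0 := by omega
      subst hr0
      simp only [List.foldl_cons, if_neg h]
      rw [ih (acc ++ [(s, s + cs - 1)]) (s + cs) 0 (by omega)]
      simp only [List.length_cons, List.range_succ_eq_map, List.map_cons, List.map_map]
      simp only [List.append_assoc, List.singleton_append]
      simp only [pvRow]
      simp
      intro j _
      have hj : (0 : Int) ≤ (j : Int) := Int.natCast_nonneg j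
      have hm : ((j : Int) + 1) * cs = (j : Int) * cs + cs := by ring
      rw [hm]
      generalize (j : Int) * cs = p
      constructor
      · omega
      · split_ifs <;> omega

-- ===== VERDICT (by name: the statement is the Claim_ definition above) =====
theorem divide_list_into_chunks_spec : Claim_equal_divide_list_into_chunks := by
  intro lst num_chunks _ hpre
  unfold Spec_divide_list_into_chunks divide_list_into_chunks divide_list_into_chunks_alt
  set cs := PySem.Int.floordiv (lst.length : Int) num_chunks with hcs
  set r := PySem.Int.mod (lst.length : Int) num_chunks with hrdef
  have hr : 0 ≤ r := by
    rw [hrdef]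
    exact PySem.Int.mod_nonneg _ hpre
  rw [pvLoop_eq cs (PySem.List.pyRange 0 num_chunks 1) [] 0 r hr]
  rw [PySem.List.pyRange_one 0 num_chunks]
  simp only [List.length_map, List.length_range, List.nil_append, List.map_map]
  apply List.map_congr_left
  intro j _
  unfold pvRow
  simp only [Function.comp, zero_add]
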